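-- pv_equiv track=rewrite | github.com/josephmeleshko/Ratio-Sets-Masters-Thesis-Data | Fibbinary/FibbinaryApproximations.py | roundUp
-- ===== SOURCE A (Python) =====
-- def roundUp(a):
--     s = a.index("11") - 1
--     while a[s-1:s+1] == "10" and s >= 1:
--             s -= 2
--     if s == -1:
--         rounded = "1" + ("0" * len(a))
--     else:
--         rounded = a[:s] + "1" + ("0" * (len(a) - (s + 1)))
--     return rounded
-- ===== SOURCE B (Python) =====
-- def roundUp(a):
--     i = a.index("11")
--     p = a[:i]
--     # binary search for the largest m such that the prefix ends with m copies of "10"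
--     lo, hi = 0, i // 2
--     while lo < hi:
--         mid = (lo + hi + 1) // 2
--         if p.endswith("10" * mid):
--             lo = mid
--         else:
--             hi = mid - 1
--     s = i - 1 - 2 * lo
--     if s == -1:
--         return "1" + "0" * len(a)
--     return a[:s] + "1" + "0" * (len(a) - s - 1)
-- ===== Notes on version B (the rewrite author's own statement) =====
-- stated objective: alternative
-- what changed: A walks a pointer backward two characters at a time over the one-zero pairs preceding the first adjacent pair of ones; B instead binary-searches the maximal count m of end-aligned one-zero pairs in that prefix (a monotone endswith predicate) and recovers the carry position s = i-1-2m in closed form.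
import Mathlib
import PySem

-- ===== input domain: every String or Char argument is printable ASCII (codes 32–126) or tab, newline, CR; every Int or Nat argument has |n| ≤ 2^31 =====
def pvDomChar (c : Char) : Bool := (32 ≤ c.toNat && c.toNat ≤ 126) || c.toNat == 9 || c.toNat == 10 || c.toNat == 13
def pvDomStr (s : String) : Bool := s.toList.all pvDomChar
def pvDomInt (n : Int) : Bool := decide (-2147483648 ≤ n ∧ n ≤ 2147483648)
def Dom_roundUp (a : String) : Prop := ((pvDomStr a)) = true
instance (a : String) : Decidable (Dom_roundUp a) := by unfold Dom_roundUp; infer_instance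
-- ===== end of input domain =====

-- B replaces A's backward step-by-2 pointer walk with a binary search on the number of
-- end-aligned one-zero pairs in the prefix before the first adjacent pair of ones (objective: alternative).

-- ===== PORT A =====
-- the while loop: s -= 2 while a[s-1:s+1] == "10" and s >= 1
def roundUpLoopA (al : List Char) (s : Int) : Int :=
  if h : PySem.List.slice al (some (s - 1)) (some (s + 1)) = ['1', '0'] ∧ 1 ≤ s then
    roundUpLoopA al (s - 2)
  else s
termination_by (s + 1).toNat
decreasing_by omega

def roundUp (a : String) : String :=
  let al := a.toList
  let s := roundUpLoopA al (PySem.Chars.find al ['1', '1'] - 1)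
  if s = -1 then String.ofList ('1' :: List.replicate al.length '0')
  else String.ofList (PySem.List.slice al none (some s) ++ '1' :: List.replicate ((al.length : Int) - (s + 1)).toNat '0')

-- ===== PORT B =====
-- "10" * k  (Python string repetition, k ≥ 0)
def rep10 (k : Nat) : List Char := (List.replicate k ['1', '0']).flatten

-- midpoint bound needed for the binary search's termination (cited by decreasing_by)
theorem roundUpMid_bounds (lo hi : Int) (h : lo < hi) :
    lo + 1 ≤ PySem.Int.floordiv (lo + hi + 1) 2 ∧ PySem.Int.floordiv (lo + hi + 1) 2 ≤ hi := by
  have e : lo + 1 + hi = lo + hi + 1 := by ring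
  have := PySem.Int.floordiv_two_mid_bounds (lo := lo + 1) (hi := hi) (by omega)
  rwa [e] at this

-- while lo < hi: mid = (lo+hi+1)//2; if p.endswith("10"*mid): lo = mid else: hi = mid-1
def roundUpLoopB (p : List Char) (lo hi : Int) : Int :=
  if h : lo < hi then
    let mid := PySem.Int.floordiv (lo + hi + 1) 2
    if PySem.Chars.endswith p (rep10 mid.toNat) = true then roundUpLoopB p mid hi
    else roundUpLoopB p lo (mid - 1)
  else lo
termination_by (hi - lo).toNat
decreasing_by
  · have := roundUpMid_bounds lo hi h; omega
  · have := roundUpMid_bounds lo hi h; omega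

def roundUp_alt (a : String) : String :=
  let al := a.toList
  let i := PySem.Chars.find al ['1', '1']
  let p := PySem.List.slice al none (some i)
  let lo := roundUpLoopB p 0 (PySem.Int.floordiv i 2)
  let s := i - 1 - 2 * lo
  if s = -1 then String.ofList ('1' :: List.replicate al.length '0')
  else String.ofList (PySem.List.slice al none (some s) ++ '1' :: List.replicate ((al.length : Int) - (s + 1)).toNat '0')

-- ===== PRECONDITION & SPEC =====
-- Pre_ excludes exactly the inputs with no pair of adjacent ones, where a.index raises ValueError in both A and B.
def Pre_roundUp (a : String) : Prop := PySem.Str.isIn "11" a = true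
instance (a : String) : Decidable (Pre_roundUp a) := by unfold Pre_roundUp; infer_instance

def pvWitness_roundUp : String := "10110"

def Spec_roundUp (a : String) (out : String) : Prop := out = roundUp_alt a
instance (a : String) (out : String) : Decidable (Spec_roundUp a out) := by unfold Spec_roundUp; infer_instance

-- ===== CLAIM (what is proved, stated in full; the proofs are below) =====
def Claim_equal_roundUp : Prop := ∀ (a : String), Dom_roundUp a → Pre_roundUp a → Spec_roundUp a (roundUp a)

-- ===== LEMMAS AND PROOFS =====

theorem rep10_length (k : Nat) : (rep10 k).length = 2 * k := by
  induction k with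
  | zero => rfl
  | succ k ih => simp [rep10, List.replicate_succ] at ih ⊢; omega

theorem rep10_succ (k : Nat) : rep10 (k + 1) = '1' :: '0' :: rep10 k := by
  simp [rep10, List.replicate_succ]

theorem rep10_add (k m : Nat) : rep10 (k + m) = rep10 k ++ rep10 m := by
  rw [rep10, rep10, rep10, List.replicate_add, List.flatten_append]

theorem rep10_suffix_mono {t : List Char} {k m : Nat} (h : k ≤ m) (hm : rep10 m <:+ t) :
    rep10 k <:+ t := by
  have : rep10 m = rep10 (m - k) ++ rep10 k := by
    rw [← rep10_add]; congr 1; omega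
  exact (this ▸ (List.suffix_append (rep10 (m - k)) (rep10 k))).trans hm

-- suffix of the prefix a[:n], characterised as a drop equality
theorem suffix_take_iff (al : List Char) (n k : Nat) (hn : n ≤ al.length) :
    rep10 k <:+ al.take n ↔ 2 * k ≤ n ∧ (al.take n).drop (n - 2 * k) = rep10 k := by
  constructor
  · intro h
    have hlen : (rep10 k).length ≤ (al.take n).length := h.length_le
    rw [rep10_length] at hlen
    rw [List.length_take] at hlen
    have h2 : 2 * k ≤ n := by omega
    refine ⟨h2, ?_⟩
    have := List.suffix_iff_eq_drop.mp h
    rw [this]; congr 1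
    rw [rep10_length, List.length_take]; omega
  · rintro ⟨h2, hd⟩
    rw [← hd]; exact List.drop_suffix _ _

-- the two-character window: stepping the suffix by one "10" pair
theorem drop_take_step (al : List Char) (n k : Nat) (hn : n ≤ al.length) (h2 : 2 * k + 2 ≤ n) :
    (al.take n).drop (n - (2 * k + 2)) = rep10 (k + 1) ↔
      ((al.drop (n - 2 * k - 2)).take 2 = ['1', '0'] ∧ (al.take n).drop (n - 2 * k) = rep10 k) := by
  have e1 : (al.take n).drop (n - (2 * k + 2)) = (al.drop (n - 2 * k - 2)).take (2 * k + 2) := by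
    rw [List.drop_take]; congr 1; omega
  have e2 : (al.drop (n - 2 * k - 2)).take (2 * k + 2) =
      (al.drop (n - 2 * k - 2)).take 2 ++ ((al.drop (n - 2 * k - 2)).drop 2).take (2 * k) := by
    have : 2 * k + 2 = 2 + 2 * k := by omega
    rw [this, List.take_add]
  have e3 : (al.drop (n - 2 * k - 2)).drop 2 = al.drop (n - 2 * k) := by
    rw [List.drop_drop]; congr 1; omega
  have e4 : (al.take n).drop (n - 2 * k) = (al.drop (n - 2 * k)).take (2 * k) := by
    rw [List.drop_take]; congr 1; omega
  have hlen2 : ((al.drop (n - 2 * k - 2)).take 2).length = 2 := by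
    rw [List.length_take, List.length_drop]; omega
  rw [e1, e2, e3, e4, rep10_succ]
  constructor
  · intro h
    have := List.append_inj (s₁ := (al.drop (n - 2 * k - 2)).take 2)
      (t₁ := (al.drop (n - 2 * k)).take (2 * k)) (s₂ := ['1', '0']) (t₂ := rep10 k) h
      (by rw [hlen2]; rfl)
    exact this
  · rintro ⟨hp, hr⟩; rw [hp, hr]; rfl

-- A's loop guard at s = n - 1 - 2k, under "k pairs already matched", says exactly "pair k+1 matches"
theorem step_iff (al : List Char) (n k : Nat) (hn : n ≤ al.length)
    (hk : rep10 k <:+ al.take n) :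
    (PySem.List.slice al (some (((n : Int) - 1 - 2 * k) - 1)) (some (((n : Int) - 1 - 2 * k) + 1)) = ['1', '0']
      ∧ 1 ≤ (n : Int) - 1 - 2 * k)
    ↔ rep10 (k + 1) <:+ al.take n := by
  constructor
  · rintro ⟨hsl, hs⟩
    have h2 : 2 * k + 2 ≤ n := by omega
    have e1 : ((n : Int) - 1 - 2 * k) - 1 = ((n - 2 * k - 2 : Nat) : Int) := by omega
    have e2 : ((n : Int) - 1 - 2 * k) + 1 = ((n - 2 * k : Nat) : Int) := by omega
    rw [e1, e2, PySem.List.slice_natCast] at hsl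
    have e3 : (n - 2 * k) - (n - 2 * k - 2) = 2 := by omega
    rw [e3] at hsl
    rw [suffix_take_iff al n (k + 1) hn]
    refine ⟨by omega, ?_⟩
    have h2k : 2 * (k + 1) = 2 * k + 2 := by omega
    rw [h2k, drop_take_step al n k hn h2]
    exact ⟨hsl, ((suffix_take_iff al n k hn).mp hk).2⟩
  · intro h
    have hst := (suffix_take_iff al n (k + 1) hn).mp h
    have h2 : 2 * k + 2 ≤ n := by omega
    have hs : 1 ≤ (n : Int) - 1 - 2 * k := by omega
    refine ⟨?_, hs⟩
    have h2k : 2 * (k + 1) = 2 * k + 2 := by omega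
    rw [h2k] at hst
    have := (drop_take_step al n k hn h2).mp hst.2
    have e1 : ((n : Int) - 1 - 2 * k) - 1 = ((n - 2 * k - 2 : Nat) : Int) := by omega
    have e2 : ((n : Int) - 1 - 2 * k) + 1 = ((n - 2 * k : Nat) : Int) := by omega
    rw [e1, e2, PySem.List.slice_natCast]
    have e3 : (n - 2 * k) - (n - 2 * k - 2) = 2 := by omega
    rw [e3]
    exact this.1

-- A's loop, started after k matched pairs, stops at the maximal m
theorem loopA_eq (al : List Char) (n m : Nat) (hn : n ≤ al.length)
    (hm : rep10 m <:+ al.take n) (hm1 : ¬ rep10 (m + 1) <:+ al.take n) :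
    ∀ (j k : Nat), k ≤ m → m - k = j →
      roundUpLoopA al ((n : Int) - 1 - 2 * k) = (n : Int) - 1 - 2 * m := by
  intro j
  induction j with
  | zero =>
    intro k hkm hj
    have hk : k = m := by omega
    subst hk
    rw [roundUpLoopA, dif_neg]
    rw [step_iff al n k hn hm]
    exact hm1
  | succ j ih =>
    intro k hkm hj
    have hk1 : rep10 (k + 1) <:+ al.take n := rep10_suffix_mono (by omega) hm
    rw [roundUpLoopA, dif_pos ((step_iff al n k hn
      (rep10_suffix_mono (by omega) hm)).mpr hk1)]
    have e : (n : Int) - 1 - 2 * k - 2 = (n : Int) - 1 - 2 * (k + 1 : Nat) := by push_cast; ring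
    rw [e]
    exact ih (k + 1) (by omega) (by omega)

-- B's binary search converges to the maximal m
theorem loopB_eq (p : List Char) (m : Nat)
    (hmax : ∀ k : Nat, PySem.Chars.endswith p (rep10 k) = true ↔ k ≤ m) :
    ∀ (N : Nat) (lo hi : Int), (hi - lo).toNat ≤ N → lo ≤ (m : Int) → (m : Int) ≤ hi →
      roundUpLoopB p lo hi = m := by
  intro N
  induction N with
  | zero =>
    intro lo hi hN hlo hhi
    rw [roundUpLoopB, dif_neg (by omega)]
    omega
  | succ N ih =>
    intro lo hi hN hlo hhi
    by_cases hlt : lo < hi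
    · have hmid := roundUpMid_bounds lo hi hlt
      rw [roundUpLoopB, dif_pos hlt]
      by_cases hC : PySem.Chars.endswith p (rep10 (PySem.Int.floordiv (lo + hi + 1) 2).toNat) = true
      · simp only [hC, if_true]
        have hle : (PySem.Int.floordiv (lo + hi + 1) 2).toNat ≤ m := (hmax _).mp hC
        exact ih _ hi (by omega) (by omega) hhi
      · simp only [hC]
        have hgt : ¬ (PySem.Int.floordiv (lo + hi + 1) 2).toNat ≤ m := fun h => hC ((hmax _).mpr h)
        exact ih lo _ (by omega) hlo (by omega)
    · rw [roundUpLoopB, dif_neg hlt]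
      omega

-- ===== VERDICT (by name: the statement is the Claim_ definition above) =====
theorem roundUp_spec : Claim_equal_roundUp := by
  intro a _hdom hpre
  unfold Spec_roundUp roundUp roundUp_alt
  set al := a.toList with hal
  -- the first-"11" index
  have hinf : ['1', '1'] <:+: al := by
    have := (PySem.Str.isIn_iff_infix "11" a).mp hpre
    simpa using this
  have hipos : 0 ≤ PySem.Chars.find al ['1', '1'] :=
    (PySem.Chars.find_nonneg_iff al ['1', '1']).mpr hinf
  set i := PySem.Chars.find al ['1', '1'] with hi
  set n := i.toNat with hn
  have hin : i = (n : Int) := by omega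
  have hpref : ['1', '1'] <+: al.drop n := (PySem.Chars.find_spec hipos).1
  have hnlen : n + 2 ≤ al.length := by
    have := hpref.length_le
    simp [List.length_drop] at this
    omega
  -- the maximal number m of end-aligned "10" pairs in a[:n]
  set t := al.take n with ht
  have htlen : t.length = n := by rw [ht, List.length_take]; omega
  set m := Nat.findGreatest (fun k => rep10 k <:+ t) n with hm
  have hm0 : rep10 0 <:+ t := by simp [rep10]
  have hmsuf : rep10 m <:+ t := by
    rw [hm]
    exact Nat.findGreatest_spec (P := fun k => rep10 k <:+ t) (Nat.zero_le n) hm0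
  have hmlen : 2 * m ≤ n := by
    have := hmsuf.length_le; rw [rep10_length, htlen] at this; exact this
  have hm1 : ¬ rep10 (m + 1) <:+ t := by
    intro hsuf
    have hl := hsuf.length_le
    rw [rep10_length, htlen] at hl
    exact Nat.findGreatest_is_greatest (P := fun k => rep10 k <:+ t) (n := n) (by omega) (by omega) hsuf
  have hmax : ∀ k : Nat, PySem.Chars.endswith t (rep10 k) = true ↔ k ≤ m := by
    intro k
    rw [PySem.Chars.endswith_iff]
    constructor
    · intro hk
      by_contra hgt
      exact hm1 (rep10_suffix_mono (by omega) hk)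
    · intro hk; exact rep10_suffix_mono hk hmsuf
  -- B's slice prefix is a[:n]
  have hpB : PySem.List.slice al none (some i) = t := by
    rw [hin, PySem.List.slice_to_natCast]
  -- B's binary search returns m
  have hB : roundUpLoopB (PySem.List.slice al none (some i)) 0 (PySem.Int.floordiv i 2) = (m : Int) := by
    rw [hpB]
    have hhalf : (m : Int) ≤ PySem.Int.floordiv i 2 := by
      rw [hin]
      rw [PySem.Int.floordiv_eq_ediv_of_pos (by norm_num)]
      omega
    exact loopB_eq t m hmax ((PySem.Int.floordiv i 2) - 0).toNat 0 _ (le_refl _) (by omega) hhalf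
  -- A's loop returns n - 1 - 2m
  have hA : roundUpLoopA al (i - 1) = (n : Int) - 1 - 2 * m := by
    have e : i - 1 = (n : Int) - 1 - 2 * ((0 : Nat) : Int) := by omega
    rw [e]
    exact loopA_eq al n m (by omega) hmsuf hm1 m 0 (Nat.zero_le m) (by omega)
  -- both sides compute the same s, then build the same string
  have hfind : PySem.Chars.find al ['1', '1'] = (n : Int) := by rw [← hi]; exact hin
  rw [hin] at hA hB
  simp only [hfind]
  rw [hA, hB]
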